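-- pv_equiv track=rewrite | github.com/gpava/Backtracking | grupos.py | indicar_grupos
-- ===== SOURCE A (Python) =====
-- N = 1
--
-- V = 2
--
-- def indicar_grupos(tablero):
-- 	grupos = []
-- 	for fila in range(len(tablero)):
-- 		for col in range(len(tablero[fila])):
-- 			if tablero[fila][col] == N:
-- 				tam_grupo = id_grupo(tablero, fila, col)
-- 				if tam_grupo > 1:
-- 					grupos.append((len(grupos) + 1, tam_grupo))
-- 	return grupos
--
-- MOVS = ((-1, 0), (1, 0), (0, -1), (0, 1))
--
-- def id_grupo(tablero, fila, col):
-- 	tam_grupo = 1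
-- 	tablero[fila][col] = V
-- 	for mov in MOVS:
-- 		fila2 = fila + mov[0]
-- 		col2 = col + mov[1]
-- 		if 0 <= fila2 < len(tablero) and 0 <= col2 < len(tablero[fila2]) and tablero[fila2][col2] == N:
-- 			tam_grupo += id_grupo(tablero, fila2, col2)
-- 	return tam_grupo
-- ===== SOURCE B (Python) =====
-- N = 1
--
-- V = 2
--
-- MOVS = ((-1, 0), (1, 0), (0, -1), (0, 1))
--
-- def indicar_grupos(tablero):
--     grupos = []
--     for fila in range(len(tablero)):
--         for col in range(len(tablero[fila])):
--             if tablero[fila][col] == N: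
--                 # iterative flood fill with an explicit stack instead of recursion
--                 tam_grupo = 0
--                 stack = [(fila, col)]
--                 while stack:
--                     f, c = stack.pop()
--                     if 0 <= f < len(tablero) and 0 <= c < len(tablero[f]) and tablero[f][c] == N:
--                         tablero[f][c] = V
--                         tam_grupo += 1
--                         stack.append((f, c + 1))
--                         stack.append((f, c - 1))
--                         stack.append((f + 1, c))
--                         stack.append((f - 1, c))
--                 if tam_grupo > 1:
--                     grupos.append((len(grupos) + 1, tam_grupo))
--     return grupos
-- ===== Notes on version B (the rewrite author's own statement) =====
-- stated objective: alternative
-- what changed: The recursive depth-first id_grupo helper is replaced by an iterative flood fill with an explicit stack (push the cell, pop, re-check in-bounds/==N, mark and count, push the four neighbours), removing the recursion; the outer row-major scan and group numbering are unchanged.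
import Mathlib
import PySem

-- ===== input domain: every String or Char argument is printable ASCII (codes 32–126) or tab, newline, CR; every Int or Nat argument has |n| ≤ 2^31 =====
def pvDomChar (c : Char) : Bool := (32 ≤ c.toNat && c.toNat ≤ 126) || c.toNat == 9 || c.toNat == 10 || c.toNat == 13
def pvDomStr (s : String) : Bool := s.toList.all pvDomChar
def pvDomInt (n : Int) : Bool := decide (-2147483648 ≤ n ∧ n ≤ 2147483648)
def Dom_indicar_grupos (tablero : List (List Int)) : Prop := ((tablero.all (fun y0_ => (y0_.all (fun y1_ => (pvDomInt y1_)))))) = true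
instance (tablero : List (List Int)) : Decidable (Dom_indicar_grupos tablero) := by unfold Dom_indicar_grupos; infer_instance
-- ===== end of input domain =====

-- B replaces A's recursive depth-first `id_grupo` by an iterative flood fill with an
-- explicit stack (alternative decomposition, same cost); both versions mutate the
-- board in place the same way, and the equivalence proved is about the return value.

-- Shared helpers (both Pythons read/write cells the same way).
-- Hand port of `tablero[f][c]` / `tablero[f][c] = V`: in both Pythons these are only
-- reached under `0 <= f < len(tablero) and 0 <= c < len(tablero[f])` (short-circuit),
-- so the `.toNat` clamp below is never consulted at a negative index; exact there.
def pvGetCell (b : List (List Int)) (f c : Int) : Int := (b.getD f.toNat []).getD c.toNat 0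

def pvSetCell (b : List (List Int)) (f c : Int) (v : Int) : List (List Int) :=
  b.set f.toNat ((b.getD f.toNat []).set c.toNat v)

-- `0 <= f2 < len(tablero) and 0 <= c2 < len(tablero[f2]) and tablero[f2][c2] == N`
def pvGuard (b : List (List Int)) (f c : Int) : Bool :=
  decide (0 ≤ f) && decide (f < (b.length : Int)) && decide (0 ≤ c) &&
    decide (c < ((b.getD f.toNat []).length : Int)) && decide (pvGetCell b f c = 1)

-- number of N-cells of the board (the termination measure; cited by the ports)
def pvCountN (b : List (List Int)) : Nat :=
  (b.map (fun r => r.countP (fun x => x == 1))).sum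

-- ===== PORT A =====
-- A's recursive id_grupo; the Nat fuel is only a totality guard (each recursive call
-- is guarded by pvGuard and marks an N-cell V, so fuel pvCountN+1 at the entry is
-- never exhausted); the proofs show the value is fuel-independent for fuel ≥ pvCountN.
def pvMOVS : List (Int × Int) := [(-1, 0), (1, 0), (0, -1), (0, 1)]

def pvIdMovs (rec : List (List Int) → Int → Int → Int × List (List Int))
    (fila col : Int) : List (Int × Int) → List (List Int) → Int → Int × List (List Int)
  | [], b, tam => (tam, b)
  | mov :: ms, b, tam =>
    let fila2 := fila + mov.1
    let col2 := col + mov.2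
    if pvGuard b fila2 col2 then
      let p := rec b fila2 col2
      pvIdMovs rec fila col ms p.2 (tam + p.1)
    else
      pvIdMovs rec fila col ms b tam

def pvIdGrupo : Nat → List (List Int) → Int → Int → Int × List (List Int)
  | 0 => fun b fila col => (1, pvSetCell b fila col 2)   -- unreachable with the entry's fuel
  | fuel + 1 => fun b fila col =>
      pvIdMovs (pvIdGrupo fuel) fila col pvMOVS (pvSetCell b fila col 2) 1

def pvCellA (fila : Int) (st : List (Int × Int) × List (List Int)) (col : Int) :
    List (Int × Int) × List (List Int) :=
  if pvGetCell st.2 fila col = 1 then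
    let p := pvIdGrupo (pvCountN st.2 + 1) st.2 fila col
    (if 1 < p.1 then st.1 ++ [((st.1.length : Int) + 1, p.1)] else st.1, p.2)
  else st

def pvRowA (st : List (Int × Int) × List (List Int)) (fila : Int) :
    List (Int × Int) × List (List Int) :=
  (PySem.List.pyRange 0 ((st.2.getD fila.toNat []).length : Int) 1).foldl (pvCellA fila) st

def indicar_grupos (tablero : List (List Int)) : List (Int × Int) :=
  ((PySem.List.pyRange 0 (tablero.length : Int) 1).foldl pvRowA ([], tablero)).1

-- ===== PORT B =====
-- iterative flood fill with an explicit stack (Python list, top = end; here top = head).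
-- The Nat fuel is only a totality guard: each iteration of the while loop strictly
-- decreases 4 * (number of N cells) + (stack length), so the entry's fuel
-- (that measure + 1, see pvFL) is never exhausted.
def pvFloodF : Nat → List (List Int) → List (Int × Int) → Int → Int × List (List Int)
  | _, b, [], size => (size, b)
  | 0, b, _ :: _, size => (size, b)   -- unreachable with the entry's fuel
  | fuel + 1, b, (f, c) :: rest, size =>
    if pvGuard b f c then
      pvFloodF fuel (pvSetCell b f c 2)
        ((f - 1, c) :: (f + 1, c) :: (f, c - 1) :: (f, c + 1) :: rest) (size + 1)
    else
      pvFloodF fuel b rest size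

def pvFL (b : List (List Int)) (stack : List (Int × Int)) (size : Int) :
    Int × List (List Int) :=
  pvFloodF (4 * pvCountN b + stack.length + 1) b stack size

def pvCellB (fila : Int) (st : List (Int × Int) × List (List Int)) (col : Int) :
    List (Int × Int) × List (List Int) :=
  if pvGetCell st.2 fila col = 1 then
    let p := pvFL st.2 [(fila, col)] 0
    (if 1 < p.1 then st.1 ++ [((st.1.length : Int) + 1, p.1)] else st.1, p.2)
  else st

def pvRowB (st : List (Int × Int) × List (List Int)) (fila : Int) :
    List (Int × Int) × List (List Int) :=
  (PySem.List.pyRange 0 ((st.2.getD fila.toNat []).length : Int) 1).foldl (pvCellB fila) st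

def indicar_grupos_alt (tablero : List (List Int)) : List (Int × Int) :=
  ((PySem.List.pyRange 0 (tablero.length : Int) 1).foldl pvRowB ([], tablero)).1

-- ===== PRECONDITION & SPEC =====
def Spec_indicar_grupos (tablero : List (List Int)) (out : List (Int × Int)) : Prop := out = indicar_grupos_alt tablero
instance (tablero : List (List Int)) (out : List (Int × Int)) : Decidable (Spec_indicar_grupos tablero out) := by unfold Spec_indicar_grupos; infer_instance

-- ===== CLAIM (what is proved, stated in full; the proofs are below) =====
def Claim_equal_indicar_grupos : Prop := ∀ (tablero : List (List Int)), Dom_indicar_grupos tablero → Spec_indicar_grupos tablero (indicar_grupos tablero)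

-- ===== LEMMAS AND PROOFS =====

-- counting lemmas: marking a guarded N-cell V decrements the N-count
theorem pvCountRow_set (row : List Int) (j : Nat) (hj : j < row.length)
    (hv : row.getD j 0 = 1) :
    (row.set j 2).countP (fun x => x == 1) + 1 = row.countP (fun x => x == 1) := by
  induction row generalizing j with
  | nil => simp at hj
  | cons x xs ih =>
    cases j with
    | zero => simp_all
    | succ j =>
      simp only [List.set_cons_succ, List.countP_cons]
      have := ih j (by simpa using hj) (by simpa using hv)
      omega

theorem pvCountN_set (b : List (List Int)) (i : Nat) (row' : List Int) (hi : i < b.length) :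
    pvCountN (b.set i row') + (b.getD i []).countP (fun x => x == 1) =
      pvCountN b + row'.countP (fun x => x == 1) := by
  induction b generalizing i with
  | nil => simp at hi
  | cons r rs ih =>
    cases i with
    | zero => simp [pvCountN]; omega
    | succ i =>
      have := ih i (by simpa using hi)
      simp only [pvCountN, List.set_cons_succ, List.map_cons, List.sum_cons,
        List.getD_cons_succ] at *
      omega

theorem pvCountN_set_guard {b : List (List Int)} {f c : Int}
    (h : pvGuard b f c = true) : pvCountN (pvSetCell b f c 2) + 1 = pvCountN b := by
  simp only [pvGuard, Bool.and_eq_true, decide_eq_true_eq] at h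
  obtain ⟨⟨⟨⟨hf0, hfl⟩, hc0⟩, hcl⟩, hv⟩ := h
  have hi : f.toNat < b.length := by omega
  have hj : c.toNat < (b.getD f.toNat []).length := by omega
  have h1 := pvCountN_set b f.toNat ((b.getD f.toNat []).set c.toNat 2) hi
  have h2 := pvCountRow_set (b.getD f.toNat []) c.toNat hj hv
  simp only [pvSetCell]
  omega


theorem pvGuard_iff (b : List (List Int)) (f c : Int) :
    pvGuard b f c = true ↔
      0 ≤ f ∧ f < (b.length : Int) ∧ 0 ≤ c ∧
        c < ((b.getD f.toNat []).length : Int) ∧ pvGetCell b f c = 1 := by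
  simp [pvGuard, and_assoc]

-- shape (list of row lengths) preservation
theorem pvShape_set (b : List (List Int)) (i : Nat) (row' : List Int)
    (h : row'.length = (b.getD i []).length) :
    (b.set i row').map List.length = b.map List.length := by
  induction b generalizing i with
  | nil => simp
  | cons r rs ih =>
    cases i with
    | zero => simp_all
    | succ i => simp_all

theorem pvShape_setCell (b : List (List Int)) (f c : Int) (v : Int) :
    (pvSetCell b f c v).map List.length = b.map List.length := by
  exact pvShape_set b f.toNat _ (by simp)

theorem pvGetD_len (b : List (List Int)) (i : Nat) :
    (b.map List.length).getD i 0 = (b.getD i []).length := by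
  induction b generalizing i with
  | nil => simp
  | cons r rs ih => cases i <;> simp_all

theorem pvShape_length {b' b : List (List Int)}
    (h : b'.map List.length = b.map List.length) : b'.length = b.length := by
  have := congrArg List.length h; simpa using this

theorem pvShape_row {b' b : List (List Int)}
    (h : b'.map List.length = b.map List.length) (i : Nat) :
    (b'.getD i []).length = (b.getD i []).length := by
  rw [← pvGetD_len, ← pvGetD_len, h]

-- step equations of the flood fill, phrased for the canonical fuel pvFL
theorem pvFloodF_stable : ∀ (f1 f2 : Nat) (b : List (List Int)) (st : List (Int × Int))
    (size : Int), 4 * pvCountN b + st.length < f1 → 4 * pvCountN b + st.length < f2 →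
    pvFloodF f1 b st size = pvFloodF f2 b st size := by
  intro f1
  induction f1 with
  | zero => intro f2 b st size h1 _; omega
  | succ u ih =>
    intro f2 b st size h1 h2
    match st with
    | [] => cases f2 with | zero => rfl | succ m => rfl
    | (f, c) :: rest =>
      cases f2 with
      | zero => omega
      | succ m =>
        by_cases hg : pvGuard b f c = true
        · have hcnt := pvCountN_set_guard hg
          simp only [pvFloodF, hg, if_true]
          exact ih m _ _ _ (by simp at h1 ⊢; omega) (by simp at h2 ⊢; omega)
        · simp only [pvFloodF, hg]
          exact ih m _ _ _ (by simp at h1 ⊢; omega) (by simp at h2 ⊢; omega)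

theorem pvFloodF_succ_cons (fuel : Nat) (b : List (List Int)) (f c : Int)
    (rest : List (Int × Int)) (size : Int) :
    pvFloodF (fuel + 1) b ((f, c) :: rest) size =
      if pvGuard b f c then
        pvFloodF fuel (pvSetCell b f c 2)
          ((f - 1, c) :: (f + 1, c) :: (f, c - 1) :: (f, c + 1) :: rest) (size + 1)
      else pvFloodF fuel b rest size := rfl

theorem pvFlood_nil (b : List (List Int)) (size : Int) : pvFL b [] size = (size, b) := rfl

theorem pvFlood_cons_pos (b : List (List Int)) (f c : Int) (rest : List (Int × Int))
    (size : Int) (h : pvGuard b f c = true) :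
    pvFL b ((f, c) :: rest) size =
      pvFL (pvSetCell b f c 2) ((f - 1, c) :: (f + 1, c) :: (f, c - 1) :: (f, c + 1) :: rest) (size + 1) := by
  have hcnt := pvCountN_set_guard h
  show pvFloodF ((4 * pvCountN b + rest.length + 1) + 1) b ((f, c) :: rest) size = _
  rw [pvFloodF_succ_cons, if_pos h]
  apply pvFloodF_stable
  all_goals simp
  all_goals omega

theorem pvFlood_cons_neg (b : List (List Int)) (f c : Int) (rest : List (Int × Int))
    (size : Int) (h : ¬ pvGuard b f c = true) :
    pvFL b ((f, c) :: rest) size = pvFL b rest size := by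
  show pvFloodF ((4 * pvCountN b + rest.length + 1) + 1) b ((f, c) :: rest) size = _
  rw [pvFloodF_succ_cons, if_neg h]
  rfl

-- the stack entries a list of moves contributes
def pvNbr (f c : Int) (movs : List (Int × Int)) : List (Int × Int) :=
  movs.map (fun m => (f + m.1, c + m.2))

theorem pvNbr_MOVS (f c : Int) :
    pvNbr f c pvMOVS = [(f - 1, c), (f + 1, c), (f, c - 1), (f, c + 1)] := by
  simp [pvNbr, pvMOVS, sub_eq_add_neg]

-- the inner move loop of id_grupo, simulated by the flood-fill stack
theorem pvKeyMovs (n : Nat) (f c : Int)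
    (HK : ∀ (b : List (List Int)) (f' c' : Int), pvCountN b ≤ n → pvGuard b f' c' = true →
      ∃ (k : Nat) (b' : List (List Int)),
        (∀ fa, n ≤ fa → pvIdGrupo fa b f' c' = ((k : Int), b')) ∧ 1 ≤ k ∧
        pvCountN b' + k = pvCountN b ∧ b'.map List.length = b.map List.length ∧
        (∀ rest size, pvFL b ((f', c') :: rest) size = pvFL b' rest (size + (k : Int)))) :
    ∀ (movs : List (Int × Int)) (b : List (List Int)) (tam : Int), pvCountN b ≤ n →
      ∃ (k : Nat) (b' : List (List Int)),
        (∀ m, n ≤ m → pvIdMovs (pvIdGrupo m) f c movs b tam = (tam + (k : Int), b')) ∧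
        pvCountN b' + k = pvCountN b ∧ b'.map List.length = b.map List.length ∧
        (∀ rest size, pvFL b (pvNbr f c movs ++ rest) size = pvFL b' rest (size + (k : Int))) := by
  intro movs
  induction movs with
  | nil =>
    intro b tam hb
    exact ⟨0, b, fun m _ => by simp [pvIdMovs], by simp, rfl, fun rest size => by simp [pvNbr]⟩
  | cons mov ms ih =>
    intro b tam hb
    by_cases hg : pvGuard b (f + mov.1) (c + mov.2) = true
    · obtain ⟨k1, b1, H1, hk1, hc1, hs1, HF1⟩ := HK b (f + mov.1) (c + mov.2) hb hg
      obtain ⟨k2, b2, H2, hc2, hs2, HF2⟩ := ih b1 (tam + (k1 : Int)) (by omega)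
      refine ⟨k1 + k2, b2, ?_, by omega, hs2.trans hs1, ?_⟩
      · intro m hm
        rw [pvIdMovs]
        simp only [hg, if_true, H1 m hm]
        rw [H2 m hm]
        push_cast; ring_nf
      · intro rest size
        have : pvNbr f c (mov :: ms) = (f + mov.1, c + mov.2) :: pvNbr f c ms := by
          simp [pvNbr]
        rw [this, List.cons_append, HF1, HF2]
        push_cast; ring_nf
    · obtain ⟨k2, b2, H2, hc2, hs2, HF2⟩ := ih b tam hb
      refine ⟨k2, b2, ?_, hc2, hs2, ?_⟩
      · intro m hm
        rw [pvIdMovs]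
        simp only [hg]
        exact H2 m hm
      · intro rest size
        have : pvNbr f c (mov :: ms) = (f + mov.1, c + mov.2) :: pvNbr f c ms := by
          simp [pvNbr]
        rw [this, List.cons_append, pvFlood_cons_neg _ _ _ _ _ hg, HF2]

-- main simulation: the recursive id_grupo and one stack-discharge of the flood fill
theorem pvKey : ∀ (n : Nat) (b : List (List Int)) (f c : Int),
    pvCountN b ≤ n → pvGuard b f c = true →
    ∃ (k : Nat) (b' : List (List Int)),
      (∀ fa, n ≤ fa → pvIdGrupo fa b f c = ((k : Int), b')) ∧ 1 ≤ k ∧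
      pvCountN b' + k = pvCountN b ∧ b'.map List.length = b.map List.length ∧
      (∀ rest size, pvFL b ((f, c) :: rest) size = pvFL b' rest (size + (k : Int))) := by
  intro n
  induction n using Nat.strong_induction_on with
  | _ n IH =>
    intro b f c hb hg
    have hcnt := pvCountN_set_guard hg
    have hn1 : 1 ≤ n := by omega
    have HK : ∀ (b : List (List Int)) (f' c' : Int), pvCountN b ≤ n - 1 →
        pvGuard b f' c' = true →
        ∃ (k : Nat) (b' : List (List Int)),
          (∀ fa, n - 1 ≤ fa → pvIdGrupo fa b f' c' = ((k : Int), b')) ∧ 1 ≤ k ∧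
          pvCountN b' + k = pvCountN b ∧ b'.map List.length = b.map List.length ∧
          (∀ rest size, pvFL b ((f', c') :: rest) size = pvFL b' rest (size + (k : Int))) :=
      fun b f' c' h hg' => IH (n - 1) (by omega) b f' c' h hg'
    obtain ⟨k', b'', Hm, hc'', hs'', HF''⟩ :=
      pvKeyMovs (n - 1) f c HK pvMOVS (pvSetCell b f c 2) 1 (by omega)
    refine ⟨k' + 1, b'', ?_, by omega, by omega,
      hs''.trans (pvShape_setCell b f c 2), ?_⟩
    · intro fa hfa
      cases fa with
      | zero => omega
      | succ m =>
        have hm := Hm m (by omega)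
        simp only [pvIdGrupo]
        rw [hm]
        push_cast; ring_nf
    · intro rest size
      rw [pvFlood_cons_pos _ _ _ _ _ hg]
      have := HF'' rest (size + 1)
      rw [pvNbr_MOVS, List.cons_append, List.cons_append, List.cons_append,
        List.cons_append, List.nil_append] at this
      rw [this]
      push_cast; ring_nf

-- one cell of the outer double loop: the two step functions agree, and shape is kept
theorem pvCellEq (g : List (Int × Int)) (b : List (List Int)) (fila col : Int)
    (hf0 : 0 ≤ fila) (hfl : fila < (b.length : Int)) (hc0 : 0 ≤ col)
    (hcl : col < ((b.getD fila.toNat []).length : Int)) :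
    pvCellA fila (g, b) col = pvCellB fila (g, b) col ∧
      (pvCellB fila (g, b) col).2.map List.length = b.map List.length := by
  by_cases hv : pvGetCell b fila col = 1
  · have hg : pvGuard b fila col = true := (pvGuard_iff b fila col).2 ⟨hf0, hfl, hc0, hcl, hv⟩
    obtain ⟨k, b', H1, hk, hc, hs, HF⟩ := pvKey (pvCountN b) b fila col (le_refl _) hg
    have hA : pvIdGrupo (pvCountN b + 1) b fila col = ((k : Int), b') := H1 _ (by omega)
    have hB : pvFL b [(fila, col)] 0 = ((k : Int), b') := by
      rw [HF [] 0, pvFlood_nil]; ring_nf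
    constructor
    · simp only [pvCellA, pvCellB, hv, if_true, hA, hB]
    · simp only [pvCellB, hv, if_true, hB]
      exact hs
  · constructor
    · simp only [pvCellA, pvCellB, hv, if_false]
    · simp only [pvCellB, hv, if_false]

-- the inner column loop
theorem pvInnerEq (cols : List Int) :
    ∀ (g : List (Int × Int)) (b : List (List Int)) (fila : Int),
      0 ≤ fila → fila < (b.length : Int) →
      (∀ cc ∈ cols, 0 ≤ cc ∧ cc < ((b.getD fila.toNat []).length : Int)) →
      cols.foldl (pvCellA fila) (g, b) = cols.foldl (pvCellB fila) (g, b) ∧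
        (cols.foldl (pvCellB fila) (g, b)).2.map List.length = b.map List.length := by
  induction cols with
  | nil => intro g b fila _ _ _; exact ⟨rfl, rfl⟩
  | cons cc cs ih =>
    intro g b fila hf0 hfl hcols
    obtain ⟨hc0, hcl⟩ := hcols cc (by simp)
    obtain ⟨hstep, hshape⟩ := pvCellEq g b fila cc hf0 hfl hc0 hcl
    rcases hst : pvCellB fila (g, b) cc with ⟨g', b'⟩
    rw [hst] at hstep hshape
    have hlen : b'.length = b.length := pvShape_length hshape
    have hrow := pvShape_row hshape fila.toNat
    obtain ⟨hrest, hshape'⟩ := ih g' b' fila hf0 (by rw [hlen]; exact hfl)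
      (fun c hc => by
        obtain ⟨h1, h2⟩ := hcols c (List.mem_cons_of_mem _ hc)
        exact ⟨h1, by rw [hrow]; exact h2⟩)
    refine ⟨?_, ?_⟩
    · simp only [List.foldl_cons, hstep, hst, hrest]
    · simp only [List.foldl_cons, hst, hshape'.trans hshape]

-- the outer row loop
theorem pvOuterEq (rows : List Int) :
    ∀ (g : List (Int × Int)) (b : List (List Int)),
      (∀ ff ∈ rows, 0 ≤ ff ∧ ff < (b.length : Int)) →
      rows.foldl pvRowA (g, b) = rows.foldl pvRowB (g, b) ∧
        (rows.foldl pvRowB (g, b)).2.map List.length = b.map List.length := by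
  induction rows with
  | nil => intro g b _; exact ⟨rfl, rfl⟩
  | cons ff fs ih =>
    intro g b hrows
    obtain ⟨hf0, hfl⟩ := hrows ff (by simp)
    obtain ⟨hstep, hshape⟩ := pvInnerEq
      (PySem.List.pyRange 0 (((b.getD ff.toNat []).length : Nat) : Int) 1) g b ff hf0 hfl
      (fun cc hcc => by rwa [PySem.List.mem_pyRange_one] at hcc)
    have hRowA : pvRowA (g, b) ff = (PySem.List.pyRange 0 (((b.getD ff.toNat []).length : Nat) : Int) 1).foldl (pvCellA ff) (g, b) := rfl
    have hRowB : pvRowB (g, b) ff = (PySem.List.pyRange 0 (((b.getD ff.toNat []).length : Nat) : Int) 1).foldl (pvCellB ff) (g, b) := rfl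
    rcases hst : (PySem.List.pyRange 0 (((b.getD ff.toNat []).length : Nat) : Int) 1).foldl (pvCellB ff) (g, b) with ⟨g', b'⟩
    rw [hst] at hstep hshape
    have hlen : b'.length = b.length := pvShape_length hshape
    obtain ⟨hrest, hshape'⟩ := ih g' b'
      (fun x hx => by
        obtain ⟨h1, h2⟩ := hrows x (List.mem_cons_of_mem _ hx)
        exact ⟨h1, by rw [hlen]; exact h2⟩)
    refine ⟨?_, ?_⟩
    · simp only [List.foldl_cons, hRowA, hRowB, hstep, hst, hrest]
    · simp only [List.foldl_cons, hRowB, hst, hshape'.trans hshape]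

-- ===== VERDICT (by name: the statement is the Claim_ definition above) =====
theorem indicar_grupos_spec : Claim_equal_indicar_grupos := by
  intro tablero _
  unfold Spec_indicar_grupos indicar_grupos indicar_grupos_alt
  rw [(pvOuterEq _ [] tablero (fun ff hff => by
    rwa [PySem.List.mem_pyRange_one] at hff)).1]
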